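-- pv_equiv track=rewrite | github.com/jhtranx/cpe202 | p1-jhtranx/perm_lex.py | perm_gen_lex
-- ===== SOURCE A (Python) =====
-- def perm_gen_lex(str_in):
--     # if str_in == []:
--     #     return []
--
--     # base cases
--     if len(str_in) == 0:
--         return []
--     if len(str_in) == 1:
--         return [str_in[0]]
--
--     result_str = []
--
--     # making simpler string
--     for char in str_in:
--         simple_str = ''
--         for x in str_in:
--             if x != char:
--                 simple_str = simple_str + x
--
--         # recursive step
--         remainder = perm_gen_lex(simple_str)
--         for val in remainder:
--             result_str.append(char + val)
--
--     return result_str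
-- ===== SOURCE B (Python) =====
-- def perm_gen_lex(str_in):
--     # Iterative explicit-stack DFS instead of recursion; same preorder emission order.
--     if len(str_in) == 0:
--         return []
--     if len(str_in) == 1:
--         return [str_in[0]]
--     results = []
--     stack = [('', str_in)]
--     while stack:
--         prefix, remaining = stack.pop()
--         if len(remaining) == 1:
--             results.append(prefix + remaining[0])
--         elif len(remaining) >= 2:
--             # push children in reverse so LIFO pop order is left-to-right
--             for ch in reversed(remaining):
--                 leftover = ''
--                 for x in remaining:
--                     if x != ch:
--                         leftover = leftover + x
--                 stack.append((prefix + ch, leftover))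
--     return results
-- ===== Notes on version B (the rewrite author's own statement) =====
-- stated objective: alternative
-- what changed: Replaces A's recursive divide-and-conquer with an iterative explicit-stack DFS over (prefix, remaining) nodes that emits completed permutations in the same left-to-right preorder.
import Mathlib
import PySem

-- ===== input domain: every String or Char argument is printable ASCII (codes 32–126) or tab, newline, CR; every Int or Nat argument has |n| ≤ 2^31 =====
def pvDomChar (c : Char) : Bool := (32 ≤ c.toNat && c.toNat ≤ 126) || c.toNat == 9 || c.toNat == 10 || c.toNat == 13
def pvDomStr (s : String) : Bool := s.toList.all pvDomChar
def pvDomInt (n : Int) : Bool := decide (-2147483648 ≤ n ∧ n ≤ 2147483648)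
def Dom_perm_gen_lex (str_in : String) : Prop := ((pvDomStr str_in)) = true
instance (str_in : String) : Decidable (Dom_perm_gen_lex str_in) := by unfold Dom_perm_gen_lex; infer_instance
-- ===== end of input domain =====

-- B replaces A's recursion by an iterative explicit-stack DFS (alternative decomposition, same cost).

-- ===== PORT A =====
-- A's recursion, over the string's character list (strings handled as List Char, results
-- turned back into String by the wrapper; 'char + val' is 'char :: val').
def permACore (l : List Char) : List (List Char) :=
  if l.length = 0 then []
  else if l.length = 1 then [l]       -- [str_in[0]] : l is exactly that single character
  else
    -- for char in str_in: simple_str = all occurrences of char removed; recurse; append char+val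
    l.attach.foldl (fun acc p =>
      acc ++ (permACore (l.filter (· ≠ p.1))).map (fun val => p.1 :: val)) []
termination_by l.length
decreasing_by
  simp
  have h := List.length_filter_lt_length_iff_exists
    (p := fun (x : {x // x ∈ l}) => !decide ((x:Char) = (p:Char))) (l := l.attach)
  simpa using h.mpr ⟨p, List.mem_attach l p, by simp⟩

def perm_gen_lex (str_in : String) : List String :=
  (permACore str_in.toList).map String.ofList

-- ===== PORT B =====
-- 'for ch in reversed(remaining): leftover = all occurrences of ch removed; stack.append(...)'
def pvPush (pre rem : List Char) (rest : List (List Char × List Char)) :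
    List (List Char × List Char) :=
  rem.reverse.foldl (fun st ch => (pre ++ [ch], rem.filter (· ≠ ch)) :: st) rest

-- the stack measure used for the while loop's termination:
-- a node with remaining length n accounts for (n+1)!
def pvStackMeasure (st : List (List Char × List Char)) : Nat :=
  (st.map (fun p => Nat.factorial (p.2.length + 1))).sum

-- pushing in reverse then popping LIFO = the children in left-to-right order on top
theorem pvRevFoldlCons {α β : Type} (l : List α) (g : α → β) (rest : List β) :
    l.reverse.foldl (fun st ch => g ch :: st) rest = l.map g ++ rest := by
  induction l generalizing rest with
  | nil => rfl
  | cons c t ih => simp [List.foldl_append, ih]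

theorem pvPush_eq_map (pre rem : List Char) (rest : List (List Char × List Char)) :
    pvPush pre rem rest
      = rem.map (fun ch => (pre ++ [ch], rem.filter (· ≠ ch))) ++ rest := by
  unfold pvPush
  exact pvRevFoldlCons rem (fun ch => (pre ++ [ch], rem.filter (· ≠ ch))) rest

theorem pvMeasure_push (pre rem : List Char) (rest : List (List Char × List Char))
    (_h2 : 2 ≤ rem.length) :
    pvStackMeasure (pvPush pre rem rest) < pvStackMeasure ((pre, rem) :: rest) := by
  rw [pvPush_eq_map]
  simp only [pvStackMeasure, List.map_append, List.sum_append, List.map_cons, List.sum_cons,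
    List.map_map, Function.comp_def]
  have hb : ∀ x ∈ (rem.map fun ch => Nat.factorial ((rem.filter (· ≠ ch)).length + 1)),
      x ≤ Nat.factorial rem.length := by
    intro x hx
    rcases List.mem_map.mp hx with ⟨ch, hch, rfl⟩
    apply Nat.factorial_le
    have : (rem.filter (· ≠ ch)).length < rem.length :=
      List.length_filter_lt_length_iff_exists.mpr ⟨ch, hch, by simp⟩
    omega
  have hs := List.sum_le_card_nsmul _ _ hb
  simp only [List.length_map, smul_eq_mul] at hs
  have hlt : rem.length * Nat.factorial rem.length < Nat.factorial (rem.length + 1) := by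
    rw [Nat.factorial_succ]
    exact Nat.mul_lt_mul_of_lt_of_le (by omega) (le_refl _) (Nat.factorial_pos _)
  omega

-- the while loop: pop (pre, rem); emit on length 1, push children on length ≥ 2
def permLoop (results : List (List Char)) (stack : List (List Char × List Char)) :
    List (List Char) :=
  match stack with
  | [] => results
  | (pre, rem) :: rest =>
    if rem.length = 1 then
      permLoop (results ++ [pre ++ rem]) rest          -- prefix + remaining[0] = pre ++ rem here
    else if 2 ≤ rem.length then
      permLoop results (pvPush pre rem rest)
    else
      permLoop results rest                            -- empty remaining: emit nothing
termination_by pvStackMeasure stack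
decreasing_by
  · simp [pvStackMeasure]
    have := Nat.factorial_pos (rem.length + 1); omega
  · exact pvMeasure_push pre rem rest (by omega)
  · simp [pvStackMeasure]
    have := Nat.factorial_pos (rem.length + 1); omega

def perm_gen_lex_alt (str_in : String) : List String :=
  let l := str_in.toList
  if l.length = 0 then []
  else if l.length = 1 then [String.ofList l]              -- [str_in[0]]
  else (permLoop [] [([], l)]).map String.ofList

-- ===== PRECONDITION & SPEC =====
def Spec_perm_gen_lex (str_in : String) (out : List String) : Prop := out = perm_gen_lex_alt str_in
instance (str_in : String) (out : List String) : Decidable (Spec_perm_gen_lex str_in out) := by unfold Spec_perm_gen_lex; infer_instance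

-- ===== CLAIM (what is proved, stated in full; the proofs are below) =====
def Claim_equal_perm_gen_lex : Prop := ∀ (str_in : String), Dom_perm_gen_lex str_in → Spec_perm_gen_lex str_in (perm_gen_lex str_in)

-- ===== LEMMAS AND PROOFS =====

theorem permACore_nil : permACore [] = [] := by
  unfold permACore; simp

theorem permACore_one (c : Char) : permACore [c] = [[c]] := by
  unfold permACore; simp

theorem foldl_append_flat {α β : Type} (l : List α) (g : α → List β) (acc : List β) :
    l.foldl (fun a x => a ++ g x) acc = acc ++ l.flatMap g := by
  induction l generalizing acc with
  | nil => simp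
  | cons h t ih => simp [ih, List.flatMap_cons]

theorem permACore_big (l : List Char) (h : 2 ≤ l.length) :
    permACore l = l.flatMap (fun c => (permACore (l.filter (· ≠ c))).map (fun v => c :: v)) := by
  conv_lhs => unfold permACore
  rw [if_neg (by omega), if_neg (by omega)]
  rw [foldl_append_flat, List.nil_append]
  rw [List.flatMap_eq_foldl, List.flatMap_eq_foldl]
  exact List.foldl_attach (l := l)
    (f := fun acc c => acc ++ (permACore (l.filter (· ≠ c))).map (fun v => c :: v)) (b := [])

theorem permLoop_node : ∀ (n : Nat) (rem : List Char), rem.length ≤ n →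
    ∀ (pre : List Char) (results : List (List Char)) (rest : List (List Char × List Char)),
    permLoop results ((pre, rem) :: rest)
      = permLoop (results ++ (permACore rem).map (fun v => pre ++ v)) rest := by
  intro n
  induction n with
  | zero =>
    intro rem hlen pre results rest
    have h0 : rem = [] := List.eq_nil_of_length_eq_zero (by omega)
    subst h0
    rw [permLoop]
    simp [permACore_nil]
  | succ n ih =>
    intro rem hlen pre results rest
    match hr : rem with
    | [] => rw [permLoop]; simp [permACore_nil]
    | [c] => rw [permLoop]; simp [permACore_one]
    | c1 :: c2 :: t =>
      set r := c1 :: c2 :: t with hrdef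
      have h2 : 2 ≤ r.length := by simp [hrdef]
      rw [permLoop]
      rw [if_neg (by omega), if_pos h2, pvPush_eq_map]
      have hlen' : r.length ≤ n + 1 := hlen
      -- process the pushed children one by one
      have key : ∀ (chs : List Char), (∀ c ∈ chs, c ∈ r) → ∀ results,
          permLoop results ((chs.map fun ch => (pre ++ [ch], r.filter (· ≠ ch))) ++ rest)
            = permLoop (results ++
                chs.flatMap (fun ch =>
                  (permACore (r.filter (· ≠ ch))).map (fun v => (pre ++ [ch]) ++ v))) rest := by
        intro chs
        induction chs with
        | nil => intro _ results; simp
        | cons c tl iht =>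
          intro hmem results
          have hcm : c ∈ r := hmem c (List.mem_cons_self ..)
          have hflt : (r.filter (· ≠ c)).length < r.length :=
            List.length_filter_lt_length_iff_exists.mpr ⟨c, hcm, by simp⟩
          rw [List.map_cons, List.cons_append,
            ih (r.filter (· ≠ c)) (by omega) (pre ++ [c]) results _,
            iht (fun x hx => hmem x (List.mem_cons_of_mem _ hx))]
          simp [List.flatMap_cons]
      rw [key r (fun _ h => h) results, permACore_big r h2]
      congr 2
      rw [List.map_flatMap]
      congr 1
      funext ch
      simp [Function.comp_def]

theorem permLoop_nil (results : List (List Char)) : permLoop results [] = results := by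
  rw [permLoop]

-- ===== VERDICT (by name: the statement is the Claim_ definition above) =====
theorem perm_gen_lex_spec : Claim_equal_perm_gen_lex := by
  intro s _
  unfold Spec_perm_gen_lex perm_gen_lex perm_gen_lex_alt
  set l := s.toList with hl
  by_cases h0 : l.length = 0
  · rw [if_pos h0]
    have : l = [] := List.eq_nil_of_length_eq_zero h0
    simp [this, permACore_nil]
  · by_cases h1 : l.length = 1
    · rw [if_neg h0, if_pos h1]
      rcases List.length_eq_one_iff.mp h1 with ⟨c, hc⟩
      simp [hc, permACore_one]
    · rw [if_neg h0, if_neg h1]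
      rw [permLoop_node l.length l (le_refl _) [] [] [], permLoop_nil]
      simp
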